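-- pv_equiv track=rewrite | github.com/henrique-lego/salience | src/salience/format.py | _words_overlap
-- ===== SOURCE A (Python) =====
-- def _words_overlap(a_words: list[str], b_words: list[str]) -> bool:
--     """Check if any word from a shares a stem with any word from b.
--
--     Uses prefix matching (min 4 chars) to handle plural/singular variations.
--     """
--     for aw in a_words:
--         for bw in b_words:
--             if aw == bw:
--                 return True
--             # Prefix match for stemming (agent/agents, automate/automation)
--             min_len = min(len(aw), len(bw))
--             if min_len >= 4 and (aw.startswith(bw[:4]) or bw.startswith(aw[:4])):
--                 return True
--     return False
-- ===== SOURCE B (Python) =====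
-- def _words_overlap(a_words: list[str], b_words: list[str]) -> bool:
--     def key(w: str) -> str:
--         return w if len(w) < 4 else w[:4]
--     ka = {key(w) for w in a_words}
--     return not ka.isdisjoint(key(w) for w in b_words)
-- ===== Notes on version B (the rewrite author's own statement) =====
-- stated objective: alternative
-- what changed: Replaces the nested pairwise scan with a stem key (the word if shorter than 4 chars, else its first 4 chars): build the set of keys of a_words once and test disjointness with b_words' keys, since two words match under A exactly when their keys are equal.
import Mathlib
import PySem

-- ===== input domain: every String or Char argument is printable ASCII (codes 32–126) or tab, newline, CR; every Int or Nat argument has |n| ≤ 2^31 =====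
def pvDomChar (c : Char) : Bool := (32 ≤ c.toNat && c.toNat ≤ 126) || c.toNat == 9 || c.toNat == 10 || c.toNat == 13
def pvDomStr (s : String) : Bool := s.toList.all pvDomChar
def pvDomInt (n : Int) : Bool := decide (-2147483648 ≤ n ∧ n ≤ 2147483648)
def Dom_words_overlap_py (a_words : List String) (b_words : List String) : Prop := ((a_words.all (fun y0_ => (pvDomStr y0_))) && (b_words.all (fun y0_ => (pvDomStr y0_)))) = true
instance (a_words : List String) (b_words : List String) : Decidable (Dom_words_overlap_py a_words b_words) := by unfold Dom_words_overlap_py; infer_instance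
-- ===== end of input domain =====

-- B replaces A's nested pairwise scan with a 4-char stem key and one set-disjointness test (alternative decomposition; return value only, no side effects).

-- ===== PORT A =====
-- inner 'for bw in b_words' loop with its two early returns
def wlInner (aw : String) : List String → Bool
  | [] => false
  | bw :: rest =>
    if aw == bw then true
    else
      let min_len := min (PySem.Str.len aw) (PySem.Str.len bw)
      if decide (4 ≤ min_len) &&
          (PySem.Str.startswith aw (PySem.Str.slice bw none (some 4)) ||
           PySem.Str.startswith bw (PySem.Str.slice aw none (some 4))) then true
      else wlInner aw rest

-- outer 'for aw in a_words' loop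
def wlOuter (b_words : List String) : List String → Bool
  | [] => false
  | aw :: rest => if wlInner aw b_words then true else wlOuter b_words rest

def words_overlap_py (a_words : List String) (b_words : List String) : Bool :=
  wlOuter b_words a_words

-- ===== PORT B =====
-- key(w) = w if len(w) < 4 else w[:4]
def wlKey (w : String) : String :=
  if PySem.Str.len w < 4 then w else PySem.Str.slice w none (some 4)

def words_overlap_py_alt (a_words : List String) (b_words : List String) : Bool :=
  let ka := PySem.Set.ofList (a_words.map wlKey)
  ! PySem.Set.isdisjoint ka (b_words.map wlKey)

-- ===== PRECONDITION & SPEC =====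
def Spec_words_overlap_py (a_words : List String) (b_words : List String) (out : Bool) : Prop := out = words_overlap_py_alt a_words b_words
instance (a_words : List String) (b_words : List String) (out : Bool) : Decidable (Spec_words_overlap_py a_words b_words out) := by unfold Spec_words_overlap_py; infer_instance

-- ===== CLAIM (what is proved, stated in full; the proofs are below) =====
def Claim_equal_words_overlap_py : Prop := ∀ (a_words : List String) (b_words : List String), Dom_words_overlap_py a_words b_words → Spec_words_overlap_py a_words b_words (words_overlap_py a_words b_words)

-- ===== LEMMAS AND PROOFS =====

-- A's match condition for one pair, as a Bool
def wlCondB (aw bw : String) : Bool :=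
  aw == bw ||
  (decide (4 ≤ min (PySem.Str.len aw) (PySem.Str.len bw)) &&
    (PySem.Str.startswith aw (PySem.Str.slice bw none (some 4)) ||
     PySem.Str.startswith bw (PySem.Str.slice aw none (some 4))))

lemma wlInner_cons (aw bw : String) (rest : List String) :
    wlInner aw (bw :: rest) = (wlCondB aw bw || wlInner aw rest) := by
  simp only [wlInner, wlCondB]
  split_ifs <;> simp_all

lemma wlInner_eq_any (aw : String) (bs : List String) :
    wlInner aw bs = bs.any (wlCondB aw) := by
  induction bs with
  | nil => rfl
  | cons bw rest ih => simp [wlInner_cons, ih]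

lemma wlOuter_eq_any (bs as : List String) :
    wlOuter bs as = as.any (fun aw => wlInner aw bs) := by
  induction as with
  | nil => rfl
  | cons aw rest ih =>
    simp only [wlOuter, List.any_cons, ← ih]
    split_ifs <;> simp_all

-- pure list form of the per-pair condition vs key equality
lemma key_take_iff (la lb : List Char) :
    (la = lb ∨ (4 ≤ la.length ∧ 4 ≤ lb.length ∧ (lb.take 4 <+: la ∨ la.take 4 <+: lb))) ↔
    (if la.length < 4 then la else la.take 4) = (if lb.length < 4 then lb else lb.take 4) := by
  by_cases ha : la.length < 4 <;> by_cases hb : lb.length < 4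
  · rw [if_pos ha, if_pos hb]
    constructor
    · rintro (h | ⟨h, _⟩)
      · exact h
      · omega
    · exact Or.inl
  · rw [if_pos ha, if_neg hb]
    have hlb : (lb.take 4).length = 4 := by simp; omega
    constructor
    · rintro (h | ⟨h, _⟩)
      · exact absurd (congrArg List.length h) (by omega)
      · omega
    · intro h
      exact absurd (congrArg List.length h) (by rw [hlb]; omega)
  · rw [if_neg ha, if_pos hb]
    have hla : (la.take 4).length = 4 := by simp; omega
    constructor
    · rintro (h | ⟨_, h, _⟩)
      · exact absurd (congrArg List.length h) (by omega)
      · omega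
    · intro h
      exact absurd (congrArg List.length h) (by rw [hla]; omega)
  · rw [if_neg ha, if_neg hb]
    have hla : (la.take 4).length = 4 := by simp; omega
    have hlb : (lb.take 4).length = 4 := by simp; omega
    have hpa : lb.take 4 <+: la ↔ la.take 4 = lb.take 4 := by
      rw [List.prefix_iff_eq_take, hlb]
      exact ⟨fun h => h.symm, fun h => h.symm⟩
    have hpb : la.take 4 <+: lb ↔ la.take 4 = lb.take 4 := by
      rw [List.prefix_iff_eq_take, hla]
    constructor
    · rintro (h | ⟨_, _, h | h⟩)
      · rw [h]
      · exact hpa.mp h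
      · exact hpb.mp h
    · intro h
      exact Or.inr ⟨by omega, by omega, Or.inl (hpa.mpr h)⟩

lemma slice4_toList (s : String) :
    (PySem.Str.slice s none (some 4)).toList = s.toList.take 4 := by
  have h := PySem.List.slice_to s.toList (by norm_num : (0:Int) ≤ 4)
  simp only [PySem.Str.toList_slice, PySem.Chars.slice_eq_listSlice, h]
  norm_num [Int.toNat]

lemma wlKey_toList (s : String) :
    (wlKey s).toList = (if s.toList.length < 4 then s.toList else s.toList.take 4) := by
  by_cases h : s.toList.length < 4
  · rw [if_pos h, wlKey, if_pos (by rw [PySem.Str.len_eq]; exact_mod_cast h)]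
  · rw [if_neg h, wlKey, if_neg (by rw [PySem.Str.len_eq]; exact_mod_cast h)]
    exact slice4_toList s

lemma wlCondB_iff (aw bw : String) :
    wlCondB aw bw = true ↔ wlKey aw = wlKey bw := by
  rw [← String.toList_inj, wlKey_toList, wlKey_toList, ← key_take_iff]
  unfold wlCondB
  simp only [Bool.or_eq_true, Bool.and_eq_true, decide_eq_true_eq, beq_iff_eq,
    PySem.Str.len_eq, PySem.Str.startswith_eq, PySem.Chars.startswith_iff, slice4_toList,
    ← String.toList_inj, le_min_iff]
  constructor
  · rintro (h | ⟨⟨h1, h2⟩, h⟩)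
    · exact Or.inl h
    · exact Or.inr ⟨by omega, by omega, h⟩
  · rintro (h | ⟨h1, h2, h⟩)
    · exact Or.inl h
    · exact Or.inr ⟨⟨by omega, by omega⟩, h⟩

lemma words_overlap_py_iff (a_words b_words : List String) :
    words_overlap_py a_words b_words = true ↔
    ∃ aw ∈ a_words, ∃ bw ∈ b_words, wlKey aw = wlKey bw := by
  unfold words_overlap_py
  rw [wlOuter_eq_any]
  simp only [List.any_eq_true, wlInner_eq_any, wlCondB_iff]

lemma words_overlap_py_alt_iff (a_words b_words : List String) :
    words_overlap_py_alt a_words b_words = true ↔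
    ∃ aw ∈ a_words, ∃ bw ∈ b_words, wlKey aw = wlKey bw := by
  unfold words_overlap_py_alt
  rw [Bool.not_eq_true', ← Bool.not_eq_true, PySem.Set.isdisjoint_iff]
  constructor
  · intro h
    rcases not_forall.mp h with ⟨x, hx⟩
    rcases Classical.not_imp.mp hx with ⟨hxa, hxb⟩
    rw [not_not] at hxb
    rw [PySem.Set.mem_ofList] at hxa
    rcases List.mem_map.mp hxa with ⟨aw, haw, rfl⟩
    rcases List.mem_map.mp hxb with ⟨bw, hbw, hk⟩
    exact ⟨aw, haw, bw, hbw, hk.symm⟩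
  · rintro ⟨aw, haw, bw, hbw, hk⟩
    intro hall
    exact hall (wlKey aw) ((PySem.Set.mem_ofList _ _).mpr (List.mem_map.mpr ⟨aw, haw, rfl⟩))
      (List.mem_map.mpr ⟨bw, hbw, hk.symm⟩)

-- ===== VERDICT (by name: the statement is the Claim_ definition above) =====
theorem words_overlap_py_spec : Claim_equal_words_overlap_py := by
  intro a_words b_words _
  unfold Spec_words_overlap_py
  rw [Bool.eq_iff_iff, words_overlap_py_iff, words_overlap_py_alt_iff]
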